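-- pv_equiv track=rewrite | github.com/Fondamenti18/fondamenti-di-programmazione | students/1803284/homework01/program03.py | ldisord
-- ===== SOURCE A (Python) =====
-- def ldisord(chiave, testo):
--   key=[x for x in chiave if 'a'<=x<='z']
--   a=''
--   l_dis=[]
--   p_o=0
--   for a in key:
--     if a not in key[p_o+1:]:
--       l_dis+=[a]
--     p_o+=1
--
--   return l_dis
-- ===== SOURCE B (Python) =====
-- def ldisord(chiave, testo):
--     counts = {}
--     for x in chiave:
--         if 'a' <= x <= 'z':
--             counts[x] = counts.get(x, 0) + 1
--     l_dis = []
--     for x in chiave: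
--         if 'a' <= x <= 'z':
--             counts[x] -= 1
--             if counts[x] == 0:
--                 l_dis.append(x)
--     return l_dis
-- ===== Notes on version B (the rewrite author's own statement) =====
-- stated objective: faster
-- what changed: Replaces A's per-element scan of the remaining slice key[p_o+1:] by two linear passes over chiave: first a dict counting each a-z letter, then a pass decrementing the count and emitting a letter exactly when its remaining count reaches zero (its last occurrence).
import Mathlib
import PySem

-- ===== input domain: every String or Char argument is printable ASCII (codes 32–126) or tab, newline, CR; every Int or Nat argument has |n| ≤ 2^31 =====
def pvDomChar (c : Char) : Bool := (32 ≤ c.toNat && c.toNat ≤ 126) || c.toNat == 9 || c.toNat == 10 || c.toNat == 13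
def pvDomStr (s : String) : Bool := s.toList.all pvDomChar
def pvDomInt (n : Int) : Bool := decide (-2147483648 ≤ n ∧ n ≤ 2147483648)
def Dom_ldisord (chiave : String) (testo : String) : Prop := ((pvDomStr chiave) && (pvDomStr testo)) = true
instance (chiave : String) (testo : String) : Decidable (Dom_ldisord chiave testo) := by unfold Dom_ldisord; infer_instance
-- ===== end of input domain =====

-- B replaces A's quadratic rest-slice scan by two linear passes: a dict counting each a-z letter, then a pass emitting a letter when its remaining count hits zero (objective: faster).


-- ===== PORT A =====
def ldisord (chiave : String) (testo : String) : List String :=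
  let key := chiave.toList.filter (fun x => decide ('a' ≤ x ∧ x ≤ 'z'))
  -- l_dis, p_o as the fold state; 'a not in key[p_o+1:]' via PySem slice
  let st := key.foldl
    (fun (s : List String × Int) a =>
      ((if a ∈ PySem.List.slice key (some (s.2 + 1)) none then s.1 else s.1 ++ [String.ofList [a]]),
       s.2 + 1))
    ([], 0)
  st.1

-- ===== PORT B =====
def ldisord_alt (chiave : String) (testo : String) : List String :=
  -- pass 1: counts[x] = counts.get(x, 0) + 1 over a-z letters of chiave
  let counts := chiave.toList.foldl
    (fun (d : PySem.Dict Char Int) x =>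
      if 'a' ≤ x ∧ x ≤ 'z' then d.insert x (d.getD x 0 + 1) else d)
    PySem.Dict.empty
  -- pass 2: counts[x] -= 1; emit x when counts[x] == 0.  'counts[x]' is read with getD _ 0,
  -- exact here because pass 1 inserted every a-z letter of chiave (the key is always present).
  let st := chiave.toList.foldl
    (fun (s : PySem.Dict Char Int × List String) x =>
      if 'a' ≤ x ∧ x ≤ 'z' then
        let d' := s.1.insert x (s.1.getD x 0 - 1)
        (d', if d'.getD x 0 = 0 then s.2 ++ [String.ofList [x]] else s.2)
      else s)
    (counts, [])
  st.2

-- ===== PRECONDITION & SPEC =====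
def Spec_ldisord (chiave : String) (testo : String) (out : List String) : Prop := out = ldisord_alt chiave testo
instance (chiave : String) (testo : String) (out : List String) : Decidable (Spec_ldisord chiave testo out) := by unfold Spec_ldisord; infer_instance

-- ===== CLAIM (what is proved, stated in full; the proofs are below) =====
def Claim_equal_ldisord : Prop := ∀ (chiave : String) (testo : String), Dom_ldisord chiave testo → Spec_ldisord chiave testo (ldisord chiave testo)

-- ===== LEMMAS AND PROOFS =====

-- a fold whose step is guarded by 'if p x' is the fold over the filtered list
theorem foldl_guard_filter {α β : Type} (p : β → Prop) [DecidablePred p] (f : α → β → α) :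
    ∀ (l : List β) (init : α),
    l.foldl (fun s x => if p x then f s x else s) init = (l.filter (fun x => decide (p x))).foldl f init := by
  intro l
  induction l with
  | nil => intro init; simp
  | cons b t ih =>
    intro init
    by_cases h : p b <;> simp [h, ih]

-- A's loop over the suffix 'suf' of 'key' (p_o = pre.length) collects last occurrences: Mathlib's List.dedup.
theorem ldisord_aFold (key : List Char) (suf : List Char) : ∀ (pre : List Char) (acc : List String),
    key = pre ++ suf →
    (suf.foldl
      (fun (s : List String × Int) a =>
        ((if a ∈ PySem.List.slice key (some (s.2 + 1)) none then s.1 else s.1 ++ [String.ofList [a]]),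
         s.2 + 1))
      (acc, (pre.length : Int))).1 = acc ++ suf.dedup.map (fun c => String.ofList [c]) := by
  induction suf with
  | nil => intro pre acc h; simp
  | cons a t ih =>
    intro pre acc h
    have hslice : PySem.List.slice key (some ((pre.length : Int) + 1)) none = t := by
      have : ((pre.length : Int) + 1) = ((pre.length + 1 : Nat) : Int) := by push_cast; ring
      rw [this, PySem.List.slice_from_natCast, h]
      simp only [List.drop_length_add_append, List.drop_succ_cons, List.drop_zero]
    have hlen : (pre.length : Int) + 1 = (((pre ++ [a]).length : Nat) : Int) := by
      simp
    have hkey : key = (pre ++ [a]) ++ t := by simp [h]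
    simp only [List.foldl_cons, hlen]
    rw [ih (pre ++ [a]) _ hkey]
    by_cases hm : a ∈ t
    · simp [hslice, hm, List.dedup_cons_of_mem]
    · simp [hslice, hm, List.dedup_cons_of_notMem]

-- B's second pass: if the dict records exactly the multiplicities of the remaining suffix,
-- the pass appends the last occurrences (= List.dedup) of that suffix.
theorem ldisord_bFold (suf : List Char) : ∀ (d : PySem.Dict Char Int) (acc : List String),
    (∀ c : Char, d.getD c 0 = (suf.count c : Int)) →
    (suf.foldl
      (fun (s : PySem.Dict Char Int × List String) x =>
        let d' := s.1.insert x (s.1.getD x 0 - 1)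
        (d', if d'.getD x 0 = 0 then s.2 ++ [String.ofList [x]] else s.2))
      (d, acc)).2 = acc ++ suf.dedup.map (fun c => String.ofList [c]) := by
  induction suf with
  | nil => intro d acc _; simp
  | cons a t ih =>
    intro d acc hinv
    have hda : d.getD a 0 = ((a :: t).count a : Int) := hinv a
    have hcount : ((a :: t).count a : Int) = (t.count a : Int) + 1 := by
      simp
    have hinv' : ∀ c : Char, (d.insert a (d.getD a 0 - 1)).getD c 0 = (t.count c : Int) := by
      intro c
      rw [PySem.Dict.getD_insert]
      by_cases hc : c = a
      · subst hc; rw [if_pos rfl, hda, hcount]; ring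
      · rw [if_neg hc, hinv c]
        simp [Ne.symm hc]
    simp only [List.foldl_cons]
    rw [ih _ _ hinv']
    have hcond : ((d.insert a (d.getD a 0 - 1)).getD a 0 = 0) ↔ (a ∉ t) := by
      rw [hinv' a]
      constructor
      · intro h0
        have : t.count a = 0 := by exact_mod_cast h0
        exact List.count_eq_zero.mp this
      · intro hnm
        have : t.count a = 0 := List.count_eq_zero.mpr hnm
        simp [this]
    by_cases hm : a ∈ t
    · rw [if_neg (by rw [hcond]; simp [hm])]
      simp [List.dedup_cons_of_mem hm]
    · rw [if_pos (hcond.mpr hm)]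
      simp [List.dedup_cons_of_notMem hm]

-- ===== VERDICT (by name: the statement is the Claim_ definition above) =====
theorem ldisord_spec : Claim_equal_ldisord := by
  intro chiave testo _
  unfold Spec_ldisord ldisord ldisord_alt
  simp only
  set key := chiave.toList.filter (fun x => decide ('a' ≤ x ∧ x ≤ 'z')) with hkey
  -- reduce both of B's guarded passes over chiave to passes over key
  rw [foldl_guard_filter (fun x => 'a' ≤ x ∧ x ≤ 'z')
        (fun (d : PySem.Dict Char Int) x => d.insert x (d.getD x 0 + 1)),
      foldl_guard_filter (fun x => 'a' ≤ x ∧ x ≤ 'z')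
        (fun (s : PySem.Dict Char Int × List String) x =>
          let d' := s.1.insert x (s.1.getD x 0 - 1)
          (d', if d'.getD x 0 = 0 then s.2 ++ [String.ofList [x]] else s.2))]
  rw [← hkey]
  have hA := ldisord_aFold key key [] ([] : List String) (by simp)
  simp only [List.length_nil, Nat.cast_zero] at hA
  rw [hA]
  have hcounts : ∀ c : Char,
      (key.foldl (fun (d : PySem.Dict Char Int) x => d.insert x (d.getD x 0 + 1)) PySem.Dict.empty).getD c 0
        = (key.count c : Int) := by
    intro c
    rw [PySem.Dict.getD_foldl_insert_add_one]
    simp [PySem.Dict.getD_empty]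
  rw [ldisord_bFold key _ [] hcounts]
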